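-- pv_equiv track=rewrite | github.com/smohapatra1/scripting | python/practice/start_again/2024/05032024/alternating_characters.py | alternating_chars
-- ===== SOURCE A (Python) =====
-- def alternating_chars(s):
--     delete , lastChar = 0, s[0]
--     for i in range(1, len(s)):
--         if s[i] == lastChar:
--             delete +=1
--             continue
--         lastChar = s[i]
--     return delete
-- ===== SOURCE B (Python) =====
-- def alternating_chars(s):
--     # Divide and conquer: count maximal runs of equal characters, then
--     # deletions = len(s) - number_of_runs.  (Returns 0 on "" where A raises.)
--     def runs(t):
--         if len(t) <= 1:
--             return len(t)
--         m = len(t) // 2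
--         return runs(t[:m]) + runs(t[m:]) - (1 if t[m - 1] == t[m] else 0)
--     return len(s) - runs(s)
-- ===== Notes on version B (the rewrite author's own statement) =====
-- stated objective: alternative
-- what changed: Replaces the left-to-right lastChar-tracking loop by a divide-and-conquer run-count (split in half, recurse, merge with a boundary comparison) and returns len(s) minus the number of runs.
import Mathlib
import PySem

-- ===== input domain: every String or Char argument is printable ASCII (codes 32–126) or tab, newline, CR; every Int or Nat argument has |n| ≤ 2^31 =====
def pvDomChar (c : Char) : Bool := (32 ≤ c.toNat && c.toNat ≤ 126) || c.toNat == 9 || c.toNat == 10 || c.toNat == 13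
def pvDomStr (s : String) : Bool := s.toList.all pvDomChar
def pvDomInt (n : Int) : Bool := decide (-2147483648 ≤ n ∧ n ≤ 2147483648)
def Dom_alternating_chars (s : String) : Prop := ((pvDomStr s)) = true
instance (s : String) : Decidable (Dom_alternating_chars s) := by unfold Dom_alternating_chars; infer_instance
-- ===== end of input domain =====

-- B changes the decomposition: divide-and-conquer run counting instead of A's sequential lastChar loop; same O(n) cost.

-- ===== PORT A =====
def alternating_chars (s : String) : Int :=
  -- delete, lastChar = 0, s[0]   (s[0] raises on the empty string: excluded by Pre_)
  ((PySem.List.pyRange 1 (s.toList.length : Int)).foldl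
    (fun (st : Int × Char) i =>
      -- s[i], always in range for i ∈ range(1, len(s))
      if PySem.List.pyGetD s.toList i ' ' == st.2 then (st.1 + 1, st.2)
      else (st.1, PySem.List.pyGetD s.toList i ' '))
    (0, PySem.List.pyGetD s.toList 0 ' ')).1

-- ===== PORT B =====
-- runs(t) from Source B; t[:m]/t[m:] are take/drop (0 ≤ m ≤ len), t[m-1]/t[m] are in-range gets
def runsB (t : List Char) : Int :=
  if t.length ≤ 1 then (t.length : Int)
  else
    runsB (t.take (t.length / 2)) + runsB (t.drop (t.length / 2)) +
      -(if t.getD (t.length / 2 - 1) ' ' == t.getD (t.length / 2) ' ' then 1 else 0)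
termination_by t.length
decreasing_by
  · simp; omega
  · simp; omega

def alternating_chars_alt (s : String) : Int :=
  (s.toList.length : Int) - runsB s.toList

-- ===== PRECONDITION & SPEC =====
-- Pre_ excludes exactly the empty string, on which A raises IndexError at s[0].
def Pre_alternating_chars (s : String) : Prop := s ≠ ""
instance (s : String) : Decidable (Pre_alternating_chars s) := by unfold Pre_alternating_chars; infer_instance
def pvWitness_alternating_chars : String := "abba"

def Spec_alternating_chars (s : String) (out : Int) : Prop := out = alternating_chars_alt s
instance (s : String) (out : Int) : Decidable (Spec_alternating_chars s out) := by unfold Spec_alternating_chars; infer_instance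

-- ===== CLAIM (what is proved, stated in full; the proofs are below) =====
def Claim_equal_alternating_chars : Prop := ∀ (s : String), Dom_alternating_chars s → Pre_alternating_chars s → Spec_alternating_chars s (alternating_chars s)
-- ===== LEMMAS AND PROOFS =====

/-- Number of equal adjacent pairs: the common characterisation of both programs. -/
def countEq : List Char → Int
  | a :: b :: r => (if a == b then 1 else 0) + countEq (b :: r)
  | _ => 0

theorem lemA (l : List Char) : ∀ (c : Char) (d : Int),
    (l.foldl (fun (st : Int × Char) c' =>
      if c' == st.2 then (st.1 + 1, st.2) else (st.1, c')) (d, c)).1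
    = d + countEq (c :: l) := by
  induction l with
  | nil => simp [countEq]
  | cons x l ih =>
    intro c d
    simp only [List.foldl_cons]
    by_cases h : x == c
    · have hx : x = c := by simpa using h
      subst hx
      simp only [h, if_pos]
      rw [ih]
      simp [countEq]
      ring
    · rw [if_neg h, ih]
      have hcx : ¬ c = x := fun e => h (by simp [e])
      simp [countEq, hcx]

theorem lemConcat : ∀ (u v : List Char) (hu : u ≠ []) (hv : v ≠ []),
    countEq (u ++ v)
      = countEq u + countEq v + (if u.getLast hu == v.head hv then 1 else 0) := by
  intro u
  induction u with
  | nil => intro v hu hv; exact absurd rfl hu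
  | cons a u ih =>
    intro v hu hv
    cases u with
    | nil =>
      cases v with
      | nil => exact absurd rfl hv
      | cons b w => simp [countEq]; ring
    | cons c u'' =>
      have h := ih v (by simp) hv
      simp only [List.cons_append] at h ⊢
      have : countEq (a :: c :: (u'' ++ v))
          = (if a == c then 1 else 0) + countEq (c :: (u'' ++ v)) := by
        cases u'' <;> cases v <;> simp [countEq]
      rw [this, h]
      have hl : (a :: c :: u'').getLast hu = (c :: u'').getLast (by simp) := by
        simp [List.getLast]
      rw [hl]
      simp [countEq]
      ring

theorem lemRuns : ∀ (t : List Char), runsB t = (t.length : Int) - countEq t := by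
  intro t
  induction t using runsB.induct with
  | case1 t h =>
    rw [runsB, if_pos h]
    match t, h with
    | [], _ => simp [countEq]
    | [a], _ => simp [countEq]
  | case2 t h ih1 ih2 =>
    rw [runsB, if_neg h]
    have hlen : 2 ≤ t.length := by omega
    have hm1 : 1 ≤ t.length / 2 := by omega
    have hm2 : t.length / 2 < t.length := by omega
    have hu : t.take (t.length / 2) ≠ [] := by
      apply List.ne_nil_of_length_pos
      rw [List.length_take]
      omega
    have hv : t.drop (t.length / 2) ≠ [] := by
      apply List.ne_nil_of_length_pos
      rw [List.length_drop]
      omega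
    have hsplit : t = t.take (t.length / 2) ++ t.drop (t.length / 2) :=
      (List.take_append_drop (t.length / 2) t).symm
    have hcat := lemConcat (t.take (t.length / 2)) (t.drop (t.length / 2)) hu hv
    have hlast : (t.take (t.length / 2)).getLast hu = t.getD (t.length / 2 - 1) ' ' := by
      rw [List.getLast_eq_getElem, List.getD_eq_getElem?_getD]
      have h1 : t.length / 2 - 1 < t.length := by omega
      rw [List.getElem?_eq_getElem h1]
      simp only [Option.getD_some]
      rw [List.getElem_take]
      congr 1
      simp [List.length_take]
      omega
    have hhead : (t.drop (t.length / 2)).head hv = t.getD (t.length / 2) ' ' := by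
      rw [List.head_eq_getElem, List.getD_eq_getElem?_getD]
      rw [List.getElem?_eq_getElem hm2]
      simp only [Option.getD_some]
      rw [List.getElem_drop]
      simp
    have hce : countEq t = countEq (t.take (t.length / 2)) + countEq (t.drop (t.length / 2)) +
        (if t.getD (t.length / 2 - 1) ' ' == t.getD (t.length / 2) ' ' then 1 else 0) := by
      conv_lhs => rw [hsplit]
      rw [hcat, hlast, hhead]
    rw [ih1, ih2, hce]
    have hlt : (t.take (t.length / 2)).length = t.length / 2 := by simp; omega
    have hld : (t.drop (t.length / 2)).length = t.length - t.length / 2 := by simp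
    rw [hlt, hld]
    have hcast : ((t.length - t.length / 2 : ℕ) : Int)
        = (t.length : Int) - ((t.length / 2 : ℕ) : Int) := by omega
    rw [hcast]
    ring

theorem portA_eq_countEq (s : String) (hs : s ≠ "") :
    alternating_chars s = countEq s.toList := by
  unfold alternating_chars
  have hne : s.toList ≠ [] := by
    intro h
    exact hs (by have := congrArg String.ofList h; simpa using this)
  match hcs : s.toList, hne with
  | c :: l, _ =>
    rw [PySem.List.foldl_pyRange_pyGetD' (c :: l) ' '
      (fun (st : Int × Char) c' => if c' == st.2 then (st.1 + 1, st.2) else (st.1, c'))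
      _ (by norm_num : (0:Int) ≤ 1)]
    simp only [Int.toNat_one, List.drop_one, List.tail_cons]
    have := lemA l c 0
    simpa using this

-- ===== VERDICT (by name: the statement is the Claim_ definition above) =====
theorem alternating_chars_spec : Claim_equal_alternating_chars := by
  intro s _ hpre
  unfold Spec_alternating_chars alternating_chars_alt
  rw [portA_eq_countEq s hpre, lemRuns]
  ring
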